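-- pv_equiv track=rewrite | github.com/JoernStoehler/msc-viterbo | packages/python_viterbo/src/viterbo/experiments/benchmark_hk2017/stage_plot.py | theoretical_permutation_count
-- ===== SOURCE A (Python) =====
-- def theoretical_permutation_count(n_facets: int) -> int:
--     """Compute theoretical number of permutations for naive HK2017."""
--     total = 0
--     for k in range(2, n_facets + 1):
--         perm = 1
--         for i in range(n_facets - k + 1, n_facets + 1):
--             perm *= i
--         total += perm
--     return total
-- ===== SOURCE B (Python) =====
-- def theoretical_permutation_count(n_facets: int) -> int:
--     """Compute theoretical number of permutations for naive HK2017."""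
--     total = 0
--     perm = n_facets
--     for k in range(2, n_facets + 1):
--         perm *= n_facets - k + 1
--         total += perm
--     return total
-- ===== Notes on version B (the rewrite author's own statement) =====
-- stated objective: faster
-- what changed: Replaces the nested loop (recomputing each falling factorial from scratch) by a single pass that maintains the falling factorial incrementally, multiplying by one new factor per step.
import Mathlib
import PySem

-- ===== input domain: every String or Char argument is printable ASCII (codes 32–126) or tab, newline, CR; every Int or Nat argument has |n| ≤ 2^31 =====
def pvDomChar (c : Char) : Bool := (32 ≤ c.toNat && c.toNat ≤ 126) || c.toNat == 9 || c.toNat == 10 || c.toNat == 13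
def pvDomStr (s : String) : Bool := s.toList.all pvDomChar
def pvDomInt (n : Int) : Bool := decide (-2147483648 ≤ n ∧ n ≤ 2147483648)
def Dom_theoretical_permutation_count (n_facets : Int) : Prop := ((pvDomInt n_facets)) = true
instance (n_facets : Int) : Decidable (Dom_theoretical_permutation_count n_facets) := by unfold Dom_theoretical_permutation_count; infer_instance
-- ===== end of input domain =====

-- B replaces A's nested loop by a single pass maintaining the falling factorial
-- incrementally (one multiplication per step): O(n) multiplications instead of O(n^2).

-- ===== PORT A =====
def theoretical_permutation_count (n_facets : Int) : Int :=
  (PySem.List.pyRange 2 (n_facets + 1) 1).foldl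
    (fun total k =>
      total + (PySem.List.pyRange (n_facets - k + 1) (n_facets + 1) 1).foldl
                (fun perm i => perm * i) 1)
    0

-- ===== PORT B =====
def theoretical_permutation_count_alt (n_facets : Int) : Int :=
  ((PySem.List.pyRange 2 (n_facets + 1) 1).foldl
    (fun (s : Int × Int) k => (s.1 + s.2 * (n_facets - k + 1), s.2 * (n_facets - k + 1)))
    (0, n_facets)).1

-- ===== PRECONDITION & SPEC =====
def Spec_theoretical_permutation_count (n_facets : Int) (out : Int) : Prop := out = theoretical_permutation_count_alt n_facets
instance (n_facets : Int) (out : Int) : Decidable (Spec_theoretical_permutation_count n_facets out) := by unfold Spec_theoretical_permutation_count; infer_instance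

-- ===== CLAIM (what is proved, stated in full; the proofs are below) =====
def Claim_equal_theoretical_permutation_count : Prop := ∀ (n_facets : Int), Dom_theoretical_permutation_count n_facets → Spec_theoretical_permutation_count n_facets (theoretical_permutation_count n_facets)

-- ===== LEMMAS AND PROOFS =====

-- foldl of multiplication from an arbitrary seed factors the seed out
lemma pv_foldl_mul_shift (l : List Int) (x : Int) :
    l.foldl (fun p i => p * i) x = x * l.foldl (fun p i => p * i) 1 := by
  induction l generalizing x with
  | nil => simp
  | cons a l ih =>
    simp only [List.foldl]
    rw [ih (x * a), ih (1 * a)]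
    ring

-- peeling the head factor off a product over a range
lemma pv_prod_range_cons (a b : Int) (h : a < b) :
    (PySem.List.pyRange a b 1).foldl (fun p i => p * i) 1
      = a * (PySem.List.pyRange (a + 1) b 1).foldl (fun p i => p * i) 1 := by
  rw [PySem.List.pyRange_one_cons h]
  simp only [List.foldl]
  rw [pv_foldl_mul_shift]
  ring

-- loop invariant: after processing k = 2 .. 1+j, B's pair holds A's running total
-- and the falling factorial ∏_{i=n-j}^{n} i
lemma pv_invariant (n : Int) (j : Nat) :
    (PySem.List.pyRange 2 (2 + (j : Int)) 1).foldl
        (fun (s : Int × Int) k => (s.1 + s.2 * (n - k + 1), s.2 * (n - k + 1))) (0, n)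
      = ((PySem.List.pyRange 2 (2 + (j : Int)) 1).foldl
          (fun total k =>
            total + (PySem.List.pyRange (n - k + 1) (n + 1) 1).foldl
                      (fun perm i => perm * i) 1) 0,
         (PySem.List.pyRange (n - (2 + (j : Int)) + 2) (n + 1) 1).foldl
           (fun perm i => perm * i) 1) := by
  induction j with
  | zero =>
    have h1 : (2:Int) + (0:Nat) = 2 := by norm_num
    have h2 : n - 2 + 2 = n := by ring
    rw [h1, PySem.List.pyRange_one_eq_nil (by norm_num : (2:Int) ≤ 2)]
    rw [h2, show PySem.List.pyRange n (n + 1) 1 = [n] from PySem.List.pyRange_one_singleton n]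
    simp
  | succ j ih =>
    have hsplit : PySem.List.pyRange 2 (2 + ((j + 1 : Nat) : Int)) 1
        = PySem.List.pyRange 2 (2 + (j : Int)) 1 ++ [2 + (j : Int)] := by
      have : (2 : Int) + ((j + 1 : Nat) : Int) = (2 + (j : Int)) + 1 := by push_cast; ring
      rw [this, PySem.List.pyRange_one_succ_right (by have := Int.natCast_nonneg j; omega)]
    rw [hsplit, List.foldl_append, List.foldl_append, ih]
    simp only [List.foldl]
    have hk1 : n - (2 + (j : Int)) + 1 < n + 1 := by
      have : (0:Int) ≤ (j : Int) := Int.natCast_nonneg j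
      omega
    have hperm :
        (PySem.List.pyRange (n - (2 + ((j+1:Nat) : Int)) + 2) (n + 1) 1).foldl
            (fun perm i => perm * i) 1
          = (PySem.List.pyRange (n - (2 + (j : Int)) + 2) (n + 1) 1).foldl
              (fun perm i => perm * i) 1 * (n - (2 + (j : Int)) + 1) := by
      have he : n - (2 + ((j+1:Nat) : Int)) + 2 = n - (2 + (j : Int)) + 1 := by push_cast; ring
      rw [he, pv_prod_range_cons _ _ hk1]
      have he2 : n - (2 + (j : Int)) + 1 + 1 = n - (2 + (j : Int)) + 2 := by ring
      rw [he2]; ring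
    refine Prod.ext ?_ ?_
    · simp only
      rw [pv_prod_range_cons _ _ hk1]
      have he2 : n - (2 + (j : Int)) + 1 + 1 = n - (2 + (j : Int)) + 2 := by ring
      rw [he2]; ring
    · simpa using hperm.symm

-- ===== VERDICT (by name: the statement is the Claim_ definition above) =====
theorem theoretical_permutation_count_spec : Claim_equal_theoretical_permutation_count := by
  intro n _
  unfold Spec_theoretical_permutation_count theoretical_permutation_count theoretical_permutation_count_alt
  by_cases hn : 1 ≤ n
  · have hj : (2 : Int) + ((n - 1).toNat : Int) = n + 1 := by
      rw [Int.toNat_of_nonneg (by omega)]; ring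
    have := pv_invariant n (n - 1).toNat
    rw [hj] at this
    rw [this]
  · rw [PySem.List.pyRange_one_eq_nil (by omega : n + 1 ≤ 2)]
    simp
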